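-- pv_equiv track=rewrite | github.com/Ssunbell/Algorithm_Study | 37주차/BOJ_주사위굴리기2/BOJ_주사위굴리기2_강태훈.py | check
-- ===== SOURCE A (Python) =====
-- def hash_function(token): return ord(token)-96
--
-- def hashing(text):
--     ans = 0
--     for idx, token in enumerate(reversed(text)):
--         ans += 27**idx * hash_function(token)
--     return ans
--
-- def check(text, n):
--     first_hash_value = hashing(text[:n])
--     substrings = set()
--     substrings.add(first_hash_value)
--     for d, i in zip(text, text[n:]):
--         first_hash_value -= 27**(n-1)*hash_function(d)
--         first_hash_value *= 27
--         first_hash_value += hash_function(i)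
--         if first_hash_value in substrings:
--             return True
--         substrings.add(first_hash_value)
--     return False
-- ===== SOURCE B (Python) =====
-- def hash_function(token): return ord(token)-96
--
-- def hashing(text):
--     ans = 0
--     for idx, token in enumerate(reversed(text)):
--         ans += 27**idx * hash_function(token)
--     return ans
--
-- def check(text, n):
--     seen = {hashing(text[:n])}
--     for i in range(1, len(text) - n + 1):
--         h = hashing(text[i:i+n])
--         if h in seen:
--             return True
--         seen.add(h)
--     return False
-- ===== Notes on version B (the rewrite author's own statement) =====
-- stated objective: simpler
-- what changed: Replaces A's incremental rolling-hash maintenance (subtract leading term, multiply, add trailing term) with independent from-scratch recomputation of hashing(text[i:i+n]) for each window start i, keeping the identical hashing helper and seen-set so collision behaviour matches exactly.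
-- outside the precondition, e.g. on check('a', -1): A returns False, B returns True
import Mathlib
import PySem

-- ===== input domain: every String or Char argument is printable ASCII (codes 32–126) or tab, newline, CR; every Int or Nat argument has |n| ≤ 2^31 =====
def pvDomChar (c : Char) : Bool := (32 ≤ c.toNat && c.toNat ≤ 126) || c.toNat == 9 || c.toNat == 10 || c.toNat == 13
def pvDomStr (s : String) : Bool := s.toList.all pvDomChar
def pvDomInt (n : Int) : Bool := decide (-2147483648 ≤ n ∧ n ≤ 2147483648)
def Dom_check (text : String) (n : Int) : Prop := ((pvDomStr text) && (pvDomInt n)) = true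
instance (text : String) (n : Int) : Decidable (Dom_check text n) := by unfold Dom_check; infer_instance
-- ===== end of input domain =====

-- B replaces A's incremental rolling-hash update by independent from-scratch rehashing of
-- each window with the identical hashing helper (objective: simpler; not faster).

-- ===== PORT A =====
def hashFunction (token : Char) : Int := (token.toNat : Int) - 96

-- shared helper of both Pythons (identical definition in Source A and Source B)
def hashing (text : List Char) : Int :=
  (PySem.List.enumerate text.reverse 0).foldl
    (fun ans p => ans + 27 ^ p.1.toNat * hashFunction p.2) 0

def checkLoop (pairs : List (Char × Char)) (h : Int) (nm1 : Nat) (s : PySem.Set Int) : Bool :=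
  match pairs with
  | [] => false
  | (d, i) :: rest =>
    let h1 := h - 27 ^ nm1 * hashFunction d
    let h2 := h1 * 27
    let h3 := h2 + hashFunction i
    if PySem.Set.contains s h3 then true
    else checkLoop rest h3 nm1 (PySem.Set.add s h3)

def check (text : String) (n : Int) : Bool :=
  let tl := text.toList
  let first := hashing (PySem.List.slice tl none (some n))
  let substrings := PySem.Set.add PySem.Set.empty first
  -- 27**(n-1): n ≥ 1 on Pre_; for n ≤ 0 Python computes a float here, outside Pre_
  checkLoop (List.zip tl (PySem.List.slice tl (some n) none)) first (n - 1).toNat substrings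

-- ===== PORT B =====
def altLoop (tl : List Char) (n : Int) (idxs : List Int) (s : PySem.Set Int) : Bool :=
  match idxs with
  | [] => false
  | i :: rest =>
    let h := hashing (PySem.List.slice tl (some i) (some (i + n)))
    if PySem.Set.contains s h then true
    else altLoop tl n rest (PySem.Set.add s h)

def check_alt (text : String) (n : Int) : Bool :=
  let tl := text.toList
  let seen := PySem.Set.ofList [hashing (PySem.List.slice tl none (some n))]
  altLoop tl n (PySem.List.pyRange 1 ((tl.length : Int) - n + 1) 1) seen

-- ===== PRECONDITION & SPEC =====
-- Pre_ excludes n ≤ 0: there A's update term 27**(n-1) is a Python float, whose binary64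
-- rounding cannot be ported exactly, so A's value there is a float-arithmetic artefact.
def Pre_check (text : String) (n : Int) : Prop := 1 ≤ n
instance (text : String) (n : Int) : Decidable (Pre_check text n) := by unfold Pre_check; infer_instance
def pvWitness_check : String × Int := ("abcab", 2)

def Spec_check (text : String) (n : Int) (out : Bool) : Prop := out = check_alt text n
instance (text : String) (n : Int) (out : Bool) : Decidable (Spec_check text n out) := by unfold Spec_check; infer_instance

-- ===== CLAIM (what is proved, stated in full; the proofs are below) =====
def Claim_equal_check : Prop := ∀ (text : String) (n : Int), Dom_check text n → Pre_check text n → Spec_check text n (check text n)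

-- ===== LEMMAS AND PROOFS =====

-- G s l a: the hashing fold over enumerate l s starting from accumulator a
def hashG (s : Int) (l : List Char) (a : Int) : Int :=
  (PySem.List.enumerate l s).foldl (fun ans p => ans + 27 ^ p.1.toNat * hashFunction p.2) a

lemma hashG_nil (s a : Int) : hashG s [] a = a := by
  simp [hashG, PySem.List.enumerate_nil]

lemma hashG_cons (s a : Int) (x : Char) (l : List Char) :
    hashG s (x :: l) a = hashG (s + 1) l (a + 27 ^ s.toNat * hashFunction x) := by
  simp [hashG, PySem.List.enumerate_cons]

lemma hashG_add (l : List Char) : ∀ (s : Nat) (a : Int),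
    hashG (s : Int) l a = a + hashG (s : Int) l 0 := by
  induction l with
  | nil => intro s a; simp [hashG_nil]
  | cons x xs ih =>
    intro s a
    rw [hashG_cons, hashG_cons]
    have hcast : ((s : Int) + 1) = ((s + 1 : Nat) : Int) := by push_cast; ring
    rw [hcast, ih (s + 1), ih (s + 1) (0 + 27 ^ (s : Int).toNat * hashFunction x)]
    ring

lemma hashG_shift (l : List Char) : ∀ (s : Nat),
    hashG ((s + 1 : Nat) : Int) l 0 = 27 * hashG (s : Int) l 0 := by
  induction l with
  | nil => intro s; simp [hashG_nil]
  | cons x xs ih =>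
    intro s
    rw [hashG_cons, hashG_cons]
    have h1 : (((s + 1 : Nat) : Int) + 1) = ((s + 2 : Nat) : Int) := by push_cast; ring
    have h2 : (((s : Nat) : Int) + 1) = ((s + 1 : Nat) : Int) := by push_cast; ring
    rw [h1, h2, hashG_add xs (s + 2), hashG_add xs (s + 1), ih (s + 1)]
    have e1 : ((s + 1 : Nat) : Int).toNat = s + 1 := by omega
    have e2 : ((s : Nat) : Int).toNat = s := by omega
    rw [e1, e2, pow_succ]
    ring

lemma hashG_append (l t : List Char) (s a : Int) :
    hashG s (l ++ t) a = hashG (s + l.length) t (hashG s l a) := by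
  simp [hashG, PySem.List.enumerate_append, List.foldl_append]

lemma hashing_eq (l : List Char) : hashing l = hashG 0 l.reverse 0 := rfl

lemma hashing_append_singleton (l : List Char) (d : Char) :
    hashing (l ++ [d]) = 27 * hashing l + hashFunction d := by
  rw [hashing_eq, List.reverse_append]
  simp only [List.reverse_singleton, List.singleton_append]
  rw [hashG_cons]
  have h1 : ((0 : Int) + 1) = ((1 : Nat) : Int) := by norm_num
  rw [h1]
  have := hashG_add l.reverse 1 (0 + 27 ^ (0 : Int).toNat * hashFunction d)
  rw [this]
  have h0 : ((0 : Nat) : Int) = (0 : Int) := by norm_num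
  have := hashG_shift l.reverse 0
  rw [h0] at this
  rw [this, hashing_eq]
  simp
  ring

lemma hashing_cons (c : Char) (l : List Char) :
    hashing (c :: l) = hashing l + 27 ^ l.length * hashFunction c := by
  rw [hashing_eq]
  have hrev : (c :: l).reverse = l.reverse ++ [c] := by simp
  rw [hrev, hashG_append, hashG_cons, hashG_nil, ← hashing_eq]
  have hs : ((0 : Int) + (l.reverse.length : Int)).toNat = l.length := by simp
  rw [hs]

-- the rolling-hash identity: A's update applied to window j yields the hash of window j+1
lemma rolling (c d : Char) (mid : List Char) :
    (hashing (c :: mid) - 27 ^ mid.length * hashFunction c) * 27 + hashFunction d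
      = hashing (mid ++ [d]) := by
  rw [hashing_cons, hashing_append_singleton]
  ring

-- main loop invariant: A's loop over the remaining zip pairs, carrying the hash of window j,
-- equals B's loop over the remaining window starts j+1, j+2, …
lemma main_loop (tl : List Char) (ν : Nat) (hν : 1 ≤ ν) :
    ∀ (k j : Nat) (s : PySem.Set Int), tl.length ≤ ν + j + k →
      checkLoop (List.zip (tl.drop j) (tl.drop (ν + j))) (hashing ((tl.drop j).take ν)) (ν - 1) s
        = altLoop tl (ν : Int) (PySem.List.pyRange ((j : Int) + 1) ((tl.length : Int) - (ν : Int) + 1) 1) s := by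
  intro k
  induction k with
  | zero =>
    intro j s hle
    have hdrop : tl.drop (ν + j) = [] := List.drop_eq_nil_of_le (by omega)
    rw [hdrop, List.zip_nil_right, PySem.List.pyRange_one_eq_nil (by push_cast; omega)]
    rfl
  | succ k ih =>
    intro j s hle
    by_cases hlt : ν + j < tl.length
    · obtain ⟨μ, hμ⟩ : ∃ μ, ν = μ + 1 := ⟨ν - 1, by omega⟩
      subst hμ
      simp only [Nat.add_sub_cancel]
      have hj : j < tl.length := by omega
      have hc : j + 1 + μ < tl.length := by omega
      have hdj : tl.drop j = tl[j] :: tl.drop (j + 1) := List.drop_eq_getElem_cons hj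
      have hdnj : tl.drop (μ + 1 + j) = tl[j + 1 + μ]'hc :: tl.drop (μ + 1 + j + 1) := by
        have e : μ + 1 + j = j + 1 + μ := by omega
        rw [e]
        exact List.drop_eq_getElem_cons hc
      have hzip : (tl.drop j).zip (tl.drop (μ + 1 + j))
          = (tl[j], tl[j + 1 + μ]'hc) :: (tl.drop (j + 1)).zip (tl.drop (μ + 1 + j + 1)) := by
        rw [hdj, hdnj]; rfl
      have hwinj : (tl.drop j).take (μ + 1) = tl[j] :: (tl.drop (j + 1)).take μ := by
        rw [hdj, List.take_succ_cons]
      have hlen1 : μ < (tl.drop (j + 1)).length := by rw [List.length_drop]; omega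
      have hwinj1 : (tl.drop (j + 1)).take (μ + 1)
          = (tl.drop (j + 1)).take μ ++ [tl[j + 1 + μ]'hc] := by
        rw [List.take_add_one, List.getElem?_eq_getElem hlen1]
        simp [List.getElem_drop]
      have hmid : ((tl.drop (j + 1)).take μ).length = μ := by
        rw [List.length_take]; omega
      have hhash : (hashing ((tl.drop j).take (μ + 1)) - 27 ^ μ * hashFunction tl[j]) * 27
            + hashFunction (tl[j + 1 + μ]'hc)
          = hashing ((tl.drop (j + 1)).take (μ + 1)) := by
        rw [hwinj, hwinj1]
        have r := rolling tl[j] (tl[j + 1 + μ]'hc) ((tl.drop (j + 1)).take μ)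
        rw [hmid] at r
        exact r
      rw [hzip, PySem.List.pyRange_one_cons (by push_cast; omega)]
      simp only [checkLoop, altLoop]
      have hc1 : ((j : Int) + 1) = ((j + 1 : Nat) : Int) := by push_cast; ring
      rw [hc1, PySem.List.slice_natCast_add tl (j + 1) (μ + 1), hhash]
      split_ifs with hmem
      · rfl
      · have H := ih (j + 1) (PySem.Set.add s (hashing ((tl.drop (j + 1)).take (μ + 1)))) (by omega)
        rw [show μ + 1 + (j + 1) = μ + 1 + j + 1 from by omega] at H
        simp only [Nat.add_sub_cancel] at H
        exact H
    · have hdrop : tl.drop (ν + j) = [] := List.drop_eq_nil_of_le (by omega)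
      rw [hdrop, List.zip_nil_right, PySem.List.pyRange_one_eq_nil (by push_cast; omega)]
      rfl

-- ===== VERDICT (by name: the statement is the Claim_ definition above) =====
theorem check_spec : Claim_equal_check := by
  intro text n _hdom hpre
  have h1n : (1 : Int) ≤ n := hpre
  have hn0 : (0 : Int) ≤ n := by omega
  unfold Spec_check check check_alt
  obtain ⟨ν, hν⟩ : ∃ ν : Nat, (ν : Int) = n := ⟨n.toNat, Int.toNat_of_nonneg hn0⟩
  subst hν
  have hν1 : 1 ≤ ν := by omega
  generalize text.toList = tl
  dsimp only
  rw [PySem.List.slice_to tl (by positivity), PySem.List.slice_from tl (by positivity)]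
  rw [show ((ν : Int) - 1).toNat = ν - 1 from by omega, Int.toNat_natCast]
  have hset : PySem.Set.add PySem.Set.empty (hashing (tl.take ν))
      = PySem.Set.ofList [hashing (tl.take ν)] := rfl
  rw [hset]
  have hmain := main_loop tl ν hν1 tl.length 0 (PySem.Set.ofList [hashing (tl.take ν)]) (by omega)
  simp only [Nat.add_zero, List.drop_zero, Nat.cast_zero, zero_add] at hmain
  exact hmain
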